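-- pv_equiv track=rewrite | github.com/thierryxdp/TCC | problems/835/solution_354270.py | melhor_volta
-- ===== SOURCE A (Python) =====
-- def melhor_volta(matriz):
--     '''    Dada uma matriz, retorna uma tupla com o nome
--     de quem fez a melhor volta, o melhor tempo e
--     em quaantas voltas isso aconteceu.
--     assinatura: matriz ---> tupla'''
--     minimos=[]
--     for linha in matriz:
--         minimos=minimos+[min(linha)]
--     menor_tempo=min(minimos)
--     corredor=list.index(minimos,menor_tempo)
--     volta=list.index(matriz[corredor],menor_tempo)
--
--     return (corredor+1,menor_tempo,volta+1)
-- ===== SOURCE B (Python) =====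
-- def melhor_volta(matriz):
--     # One fused pass: running (best time, row index), strict '<' keeps the first row.
--     best = None
--     for i, linha in enumerate(matriz):
--         m = min(linha)
--         if best is None or m < best[0]:
--             best = (m, i)
--     if best is None:
--         raise ValueError("min() arg is an empty sequence")
--     menor_tempo, corredor = best
--     volta = matriz[corredor].index(menor_tempo)
--     return (corredor + 1, menor_tempo, volta + 1)
-- ===== Notes on version B (the rewrite author's own statement) =====
-- stated objective: simpler
-- what changed: A builds a list of row minima by repeated list concatenation, then makes two more passes (min over that list, then index) to locate the best row; B fuses these into a single enumerate pass keeping a running (best, row) pair updated with strict '<', so no intermediate list is built.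
import Mathlib
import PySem

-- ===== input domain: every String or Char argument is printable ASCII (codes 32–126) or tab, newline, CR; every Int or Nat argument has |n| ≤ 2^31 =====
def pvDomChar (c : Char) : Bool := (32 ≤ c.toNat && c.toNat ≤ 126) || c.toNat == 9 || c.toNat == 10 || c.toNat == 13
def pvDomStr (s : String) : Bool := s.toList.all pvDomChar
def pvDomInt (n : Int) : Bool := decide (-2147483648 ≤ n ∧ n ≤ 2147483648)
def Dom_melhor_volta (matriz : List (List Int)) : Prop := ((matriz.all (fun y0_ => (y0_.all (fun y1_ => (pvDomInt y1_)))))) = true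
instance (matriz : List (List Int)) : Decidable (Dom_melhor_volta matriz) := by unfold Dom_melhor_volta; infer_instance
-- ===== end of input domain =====

-- B fuses A's three passes (build list of row minima, min over it, index) into one
-- enumerate pass with a running (best, row-index) pair; same return value on Pre_.

-- ===== PORT A =====
-- min(l) for a list of ints; Pre_ guarantees l ≠ [], so the getD default is never used
def pymin (l : List Int) : Int := (PySem.List.min? l (fun y => y)).getD 0

def melhor_volta (matriz : List (List Int)) : Int × Int × Int :=
  let minimos := matriz.foldl (fun acc linha => acc ++ [pymin linha]) []
  let menor_tempo := pymin minimos
  let corredor : Nat := (PySem.List.index? minimos menor_tempo).getD 0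
  let volta : Nat :=
    (PySem.List.index? ((PySem.List.pyGet? matriz (corredor : Int)).getD []) menor_tempo).getD 0
  ((corredor : Int) + 1, menor_tempo, (volta : Int) + 1)

-- ===== PORT B =====
-- the fused loop of Source B: best = None; for i, linha in enumerate(matriz): …
def altLoop : List (List Int) → Nat → Option (Int × Nat) → Option (Int × Nat)
  | [], _, best => best
  | linha :: rest, i, best =>
      let m := pymin linha
      let best' :=
        match best with
        | none => some (m, i)
        | some (bv, bi) => if m < bv then some (m, i) else some (bv, bi)
      altLoop rest (i + 1) best'

def melhor_volta_alt (matriz : List (List Int)) : Int × Int × Int :=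
  match altLoop matriz 0 none with
  | none => (0, 0, 0)   -- Source B raises ValueError here (empty matrix); outside Pre_
  | some (menor_tempo, corredor) =>
      let volta : Nat :=
        (PySem.List.index? ((PySem.List.pyGet? matriz (corredor : Int)).getD []) menor_tempo).getD 0
      ((corredor : Int) + 1, menor_tempo, (volta : Int) + 1)

-- ===== PRECONDITION & SPEC =====
-- Pre_ excludes exactly the inputs on which Python A raises ValueError:
-- the empty matrix and matrices containing an empty row (min of an empty sequence).
def Pre_melhor_volta (matriz : List (List Int)) : Prop :=
  matriz ≠ [] ∧ ∀ linha ∈ matriz, linha ≠ []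
instance (matriz : List (List Int)) : Decidable (Pre_melhor_volta matriz) := by
  unfold Pre_melhor_volta; infer_instance

def pvWitness_melhor_volta : List (List Int) := [[3, 1], [2, 5]]

def Spec_melhor_volta (matriz : List (List Int)) (out : Int × Int × Int) : Prop := out = melhor_volta_alt matriz
instance (matriz : List (List Int)) (out : Int × Int × Int) : Decidable (Spec_melhor_volta matriz out) := by unfold Spec_melhor_volta; infer_instance

-- ===== CLAIM (what is proved, stated in full; the proofs are below) =====
def Claim_equal_melhor_volta : Prop := ∀ (matriz : List (List Int)), Dom_melhor_volta matriz → Pre_melhor_volta matriz → Spec_melhor_volta matriz (melhor_volta matriz)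

-- ===== LEMMAS AND PROOFS =====

-- A's foldl that rebuilds the minima list is map
lemma build_eq_map (l : List (List Int)) (acc : List Int) :
    l.foldl (fun a x => a ++ [pymin x]) acc = acc ++ l.map pymin := by
  induction l generalizing acc with
  | nil => simp
  | cons x xs ih => simp [List.foldl, ih]

-- characterization of B's loop given a nonempty accumulator:
-- the result value is the running min, the index is the first position achieving it
lemma altLoop_char (rs : List (List Int)) (i : Nat) (bv : Int) (bi : Nat) :
    altLoop rs i (some (bv, bi)) =
      some ((rs.map pymin).foldl min bv,
        if (rs.map pymin).foldl min bv < bv then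
          i + (PySem.List.index? (rs.map pymin) ((rs.map pymin).foldl min bv)).getD 0
        else bi) := by
  induction rs generalizing i bv bi with
  | nil => simp [altLoop]
  | cons r rs ih =>
    by_cases hlt : pymin r < bv
    · have hstep : altLoop (r :: rs) i (some (bv, bi)) = altLoop rs (i + 1) (some (pymin r, i)) := by
        simp [altLoop, hlt]
      rw [hstep, ih]
      have hv : (List.map pymin (r :: rs)).foldl min bv = (rs.map pymin).foldl min (pymin r) := by
        simp only [List.map_cons, List.foldl_cons, min_eq_right (le_of_lt hlt)]
      rw [hv]
      set v := (rs.map pymin).foldl min (pymin r) with hvdef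
      have hvle : v ≤ pymin r := (PySem.List.foldl_min_le (rs.map pymin) (pymin r)).1
      have hvbv : v < bv := lt_of_le_of_lt hvle hlt
      rw [if_pos hvbv]
      by_cases h2 : v < pymin r
      · have hvm : v ∈ rs.map pymin := by
          rcases PySem.List.foldl_min_mem (rs.map pymin) (pymin r) with h | h
          · exact absurd h (by omega)
          · exact h
        obtain ⟨k, hk⟩ := Option.isSome_iff_exists.1
          ((PySem.List.index?_isSome_iff _ _).2 hvm)
        have hne : pymin r ≠ v := by omega
        rw [if_pos h2]
        simp only [List.map_cons, PySem.List.index?_cons_of_ne _ hne, hk]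
        simp; omega
      · have hveq : v = pymin r := le_antisymm hvle (by omega)
        rw [if_neg h2, hveq]
        simp only [List.map_cons, PySem.List.index?_cons_self]
        simp
    · have hstep : altLoop (r :: rs) i (some (bv, bi)) = altLoop rs (i + 1) (some (bv, bi)) := by
        simp [altLoop, hlt]
      rw [hstep, ih]
      have hv : (List.map pymin (r :: rs)).foldl min bv = (rs.map pymin).foldl min bv := by
        simp only [List.map_cons, List.foldl_cons, min_eq_left (by omega : bv ≤ pymin r)]
      rw [hv]
      set v := (rs.map pymin).foldl min bv with hvdef
      by_cases h2 : v < bv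
      · have hvm : v ∈ rs.map pymin := by
          rcases PySem.List.foldl_min_mem (rs.map pymin) bv with h | h
          · exact absurd h (by omega)
          · exact h
        obtain ⟨k, hk⟩ := Option.isSome_iff_exists.1
          ((PySem.List.index?_isSome_iff _ _).2 hvm)
        have hne : pymin r ≠ v := by omega
        rw [if_pos h2, if_pos h2]
        simp only [List.map_cons, PySem.List.index?_cons_of_ne _ hne, hk]
        simp; omega
      · rw [if_neg h2, if_neg h2]

-- both ports compute the same (menor_tempo, corredor) on a nonempty matrix
lemma heads_agree (r : List Int) (rs : List (List Int)) :
    altLoop (r :: rs) 0 none =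
      some (pymin ((r :: rs).map pymin),
        (PySem.List.index? ((r :: rs).map pymin) (pymin ((r :: rs).map pymin))).getD 0) := by
  have h0 : altLoop (r :: rs) 0 none = altLoop rs 1 (some (pymin r, 0)) := by
    simp [altLoop]
  rw [h0, altLoop_char]
  have hmin : pymin ((r :: rs).map pymin) = (rs.map pymin).foldl min (pymin r) := by
    simp [pymin, PySem.List.min?_id_cons]
  set v := (rs.map pymin).foldl min (pymin r) with hvdef
  have hvle : v ≤ pymin r := (PySem.List.foldl_min_le (rs.map pymin) (pymin r)).1
  rw [hmin]
  by_cases h2 : v < pymin r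
  · have hvm : v ∈ rs.map pymin := by
      rcases PySem.List.foldl_min_mem (rs.map pymin) (pymin r) with h | h
      · exact absurd h (by omega)
      · exact h
    obtain ⟨k, hk⟩ := Option.isSome_iff_exists.1
      ((PySem.List.index?_isSome_iff _ _).2 hvm)
    have hne : pymin r ≠ v := by omega
    rw [if_pos h2]
    simp only [List.map_cons, PySem.List.index?_cons_of_ne _ hne, hk]
    simp
    omega
  · have hveq : v = pymin r := le_antisymm hvle (by omega)
    rw [if_neg h2, hveq]
    simp only [List.map_cons, PySem.List.index?_cons_self]
    simp

-- ===== VERDICT (by name: the statement is the Claim_ definition above) =====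
theorem melhor_volta_spec : Claim_equal_melhor_volta := by
  intro matriz _ hpre
  unfold Spec_melhor_volta
  obtain ⟨hne, -⟩ := hpre
  obtain ⟨r, rs, rfl⟩ : ∃ r rs, matriz = r :: rs := by
    cases matriz with
    | nil => exact absurd rfl hne
    | cons r rs => exact ⟨r, rs, rfl⟩
  unfold melhor_volta melhor_volta_alt
  rw [heads_agree, build_eq_map]
  simp
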